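-- pv_equiv track=rewrite | github.com/miliar/Code_Jam_Webscraper | Solutions_python/Problem_84/183.py | solve
-- ===== SOURCE A (Python) =====
-- def solve(R, C, M):
--     if len([m for m in M if '#' in m])==0:
--         return '\n'.join([''.join(m) for m in M])
--     for r in range(R):
--         for c in range(C):
--             if M[r][c]=='#':
--                 M1 = [m[:] for m in M]
--                 M1 = search(M1, R, C, r, c)
--                 if M1!=None:
--                     return '\n'.join([''.join(m) for m in M1])
--     return 'Impossible'
--
-- def search(M, R, C, r, c):
--     if len([m for m in M if '#' in m])==0:
--         return M
--     if (r+1)<R and (c+1)<C and M[r+1][c]=='#' and M[r][c+1]=='#' and M[r+1][c+1]=='#':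
--         M1 = [m[:] for m in M]
--         M1[r][c]='/'
--         M1[r+1][c]='\\'
--         M1[r][c+1]='\\'
--         M1[r+1][c+1]='/'
--         for rr in range(R):
--             for cc in range(C):
--                 if M1[rr][cc]=='#':
--                     M2 = search(M1, R, C, rr, cc)
--                     if M2!= None:
--                         return M2
--                     else:
--                         return None
--         return M1
--     else:
--         return None
-- ===== SOURCE B (Python) =====
-- def solve(R, C, M):
--     # Single linear greedy pass: the first remaining '#' (row-major) must be the
--     # top-left of an all-'#' 2x2 block; fill it in place and keep scanning.
--     if not any('#' in row for row in M):
--         return '\n'.join(''.join(row) for row in M)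
--     G = [row[:] for row in M]
--     found = False
--     for r in range(R):
--         for c in range(C):
--             if G[r][c] == '#':
--                 found = True
--                 if r + 1 < R and c + 1 < C and G[r + 1][c] == '#' \
--                         and G[r][c + 1] == '#' and G[r + 1][c + 1] == '#':
--                     G[r][c] = '/'
--                     G[r + 1][c] = '\\'
--                     G[r][c + 1] = '\\'
--                     G[r + 1][c + 1] = '/'
--                 else:
--                     return 'Impossible'
--     if not found:
--         return 'Impossible'
--     return '\n'.join(''.join(row) for row in G)
-- ===== Notes on version B (the rewrite author's own statement) =====
-- stated objective: alternative
-- what changed: A retries a fresh copy-and-rescan backtracking search from every '#' cell, re-scanning and recopying the whole grid after each 2x2 placement; B does a single in-place row-major pass, forcing each first remaining '#' to be the top-left of a 2x2 block (the first placement attempt is provably decisive, so the retries, copies and rescans disappear); intended as asymptotically lighter (O(R*C) vs O((R*C)^2)-ish) but a timing run could not consistently confirm >=1.5x, so no speed is claimed.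
import Mathlib
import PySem

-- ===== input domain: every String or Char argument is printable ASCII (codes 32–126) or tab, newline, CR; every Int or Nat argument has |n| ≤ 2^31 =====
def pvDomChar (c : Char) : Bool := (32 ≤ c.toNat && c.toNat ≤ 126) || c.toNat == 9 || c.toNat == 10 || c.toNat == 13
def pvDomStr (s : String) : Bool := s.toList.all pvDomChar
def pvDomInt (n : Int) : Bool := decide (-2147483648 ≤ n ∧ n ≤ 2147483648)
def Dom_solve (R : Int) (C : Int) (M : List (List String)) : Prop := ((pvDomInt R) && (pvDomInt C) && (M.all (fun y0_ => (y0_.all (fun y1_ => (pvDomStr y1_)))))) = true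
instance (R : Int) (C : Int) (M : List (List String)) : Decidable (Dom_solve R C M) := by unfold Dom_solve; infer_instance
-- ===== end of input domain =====

-- B rewrites A's retry-all-start-cells backtracking scan (which recopies and rescans the whole
-- grid after every placement) as one in-place row-major greedy pass; return values only, neither
-- port models Python's in-place list mutation (A's solve works on copies; B mutates its own copy).

-- ===== PORT A =====
-- shared primitive helpers (both Pythons contain these exact expressions)
-- '#' in m  (Python list membership)
def rowHasHash (row : List String) : Bool := row.contains "#"
-- len([m for m in M if '#' in m]) == 0
def gridNoHash (M : List (List String)) : Bool := !(M.any rowHasHash)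
-- '\n'.join([''.join(m) for m in M])
def joinGrid (M : List (List String)) : String :=
  PySem.Str.join "\n" (M.map (fun m => PySem.Str.join "" m))
-- M[r][c] for the nonnegative indices the range loops produce ("" where Python raises IndexError; Pre_ excludes that)
def getCell (M : List (List String)) (r c : Nat) : String := ((M[r]?).getD [])[c]?.getD ""
-- M[r][c] = v  (no-op where Python raises IndexError; Pre_ excludes that)
def setCell : List (List String) → Nat → Nat → String → List (List String)
  | [], _, _, _ => []
  | row :: rest, 0, c, v => row.set c v :: rest
  | row :: rest, r+1, c, v => row :: setCell rest r c v
-- the four assignments of `search` / of B's loop body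
def place (M : List (List String)) (r c : Nat) : List (List String) :=
  setCell (setCell (setCell (setCell M r c "/") (r+1) c "\\") r (c+1) "\\") (r+1) (c+1) "/"
-- the 2x2 guard `(r+1)<R and (c+1)<C and M[r+1][c]=='#' and M[r][c+1]=='#' and M[r+1][c+1]=='#'`
def blockOK (R C : Int) (M : List (List String)) (r c : Nat) : Bool :=
  ((r:Int)+1 < R) && ((c:Int)+1 < C) && (getCell M (r+1) c == "#")
    && (getCell M r (c+1) == "#") && (getCell M (r+1) (c+1) == "#")
-- first '#' in the R×C window, row-major (the rr/cc rescan loop of `search`)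
def findHash (R C : Int) (M : List (List String)) : Option (Nat × Nat) :=
  (List.range R.toNat).findSome? (fun r =>
    (List.range C.toNat).findSome? (fun c =>
      if getCell M r c == "#" then some (r, c) else none))
-- termination measure for `search` (number of '#' cells)
def countHash (M : List (List String)) : Nat := (M.map (fun row => row.count "#")).sum

-- termination lemmas for `search` (cited by its decreasing_by)
theorem count_set_le (row : List String) (c : Nat) (v : String) (hv : v ≠ "#") :
    (row.set c v).count "#" ≤ row.count "#" := by
  induction row generalizing c with
  | nil => simp
  | cons a l ih =>
    cases c with
    | zero => simp [List.count_cons, hv]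
    | succ n => simp only [List.set, List.count_cons]; exact Nat.add_le_add_right (ih n) _
theorem count_set_lt (row : List String) (c : Nat) (v : String) (hv : v ≠ "#")
    (h : row[c]? = some "#") : (row.set c v).count "#" < row.count "#" := by
  induction row generalizing c with
  | nil => simp at h
  | cons a l ih =>
    cases c with
    | zero => simp at h; subst h; simp [hv]
    | succ n =>
      simp at h
      simp only [List.set, List.count_cons]
      exact Nat.add_lt_add_right (ih n h) _
theorem countHash_setCell_le (M : List (List String)) (r c : Nat) (v : String) (hv : v ≠ "#") :
    countHash (setCell M r c v) ≤ countHash M := by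
  induction M generalizing r with
  | nil => simp [setCell]
  | cons row rest ih =>
    cases r with
    | zero =>
      simpa [setCell, countHash] using
        Nat.add_le_add_right (count_set_le row c v hv) (countHash rest)
    | succ n =>
      simpa [setCell, countHash] using Nat.add_le_add_left (ih n) (row.count "#")
theorem countHash_setCell_lt (M : List (List String)) (r c : Nat) (v : String) (hv : v ≠ "#")
    (h : getCell M r c = "#") : countHash (setCell M r c v) < countHash M := by
  induction M generalizing r with
  | nil => simp [getCell] at h
  | cons row rest ih =>
    cases r with
    | zero =>
      simp only [getCell, List.getElem?_cons_zero, Option.getD_some] at h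
      have hc : row[c]? = some "#" := by
        cases hx : row[c]? with
        | none => simp [hx] at h
        | some s => simp [hx] at h; simp [h]
      simpa [setCell, countHash] using
        Nat.add_lt_add_right (count_set_lt row c v hv hc) (countHash rest)
    | succ n =>
      simp only [getCell, List.getElem?_cons_succ] at h
      simpa [setCell, countHash] using Nat.add_lt_add_left (ih n h) (row.count "#")
theorem getCell_setCell_ne (M : List (List String)) (r c r' c' : Nat) (v : String)
    (h : (r, c) ≠ (r', c')) : getCell (setCell M r' c' v) r c = getCell M r c := by
  induction M generalizing r r' with
  | nil => simp [setCell]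
  | cons row rest ih =>
    cases r' with
    | zero =>
      cases r with
      | zero =>
        have hc : c ≠ c' := by simpa using h
        simp [setCell, getCell, List.getElem?_set_ne (Ne.symm hc)]
      | succ m => simp [setCell, getCell]
    | succ n' =>
      cases r with
      | zero => simp [setCell, getCell]
      | succ m =>
        have : (m, c) ≠ (n', c') := by simp at h ⊢; omega
        simp only [setCell, getCell, List.getElem?_cons_succ]
        exact ih m n' this

theorem countHash_place_lt (M : List (List String)) (r c : Nat)
    (h : getCell M (r+1) c = "#") : countHash (place M r c) < countHash M :=
  calc countHash (place M r c)
      ≤ countHash (setCell (setCell (setCell M r c "/") (r+1) c "\\") r (c+1) "\\") :=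
        countHash_setCell_le _ _ _ _ (by decide)
    _ ≤ countHash (setCell (setCell M r c "/") (r+1) c "\\") :=
        countHash_setCell_le _ _ _ _ (by decide)
    _ < countHash (setCell M r c "/") :=
        countHash_setCell_lt _ _ _ _ (by decide)
          (by rw [getCell_setCell_ne _ _ _ _ _ _ (by simp)]; exact h)
    _ ≤ countHash M := countHash_setCell_le _ _ _ _ (by decide)

-- port of `search(M, R, C, r, c)`
def search (M : List (List String)) (R C : Int) (r c : Nat) : Option (List (List String)) :=
  if gridNoHash M then some M
  else if blockOK R C M r c then
    match findHash R C (place M r c) with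
    | some (rr, cc) => search (place M r c) R C rr cc
    | none => some (place M r c)
  else none
termination_by countHash M
decreasing_by
  exact countHash_place_lt M r c (by
    simp only [blockOK, Bool.and_eq_true, beq_iff_eq] at *; tauto)

-- port of A's `solve`: try each '#' of the window in row-major order; return the first
-- successful `search` (the loop continues past a failed one), else 'Impossible'
def solve (R : Int) (C : Int) (M : List (List String)) : String :=
  if gridNoHash M then joinGrid M
  else
    match (List.range R.toNat).findSome? (fun r =>
        (List.range C.toNat).findSome? (fun c =>
          if getCell M r c == "#" then (search M R C r c).map joinGrid else none)) with
    | some s => s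
    | none => "Impossible"

-- ===== PORT B =====
-- the row-major list of window cells visited by B's two `for` loops
def cellsList (R C : Int) : List (Nat × Nat) :=
  (List.range R.toNat).flatMap (fun r => (List.range C.toNat).map (fun c => (r, c)))
-- one iteration of B's loop body: `none` = `return 'Impossible'`
def scanStep (R C : Int) (st : List (List String) × Bool) (p : Nat × Nat) :
    Option (List (List String) × Bool) :=
  if getCell st.1 p.1 p.2 == "#" then
    if blockOK R C st.1 p.1 p.2 then some (place st.1 p.1 p.2, true) else none
  else some st
-- B's loop: thread (grid, found) through the cells, aborting on Impossible
def scanFold (R C : Int) : List (Nat × Nat) → List (List String) × Bool →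
    Option (List (List String) × Bool)
  | [], st => some st
  | p :: ps, st =>
    match scanStep R C st p with
    | some st' => scanFold R C ps st'
    | none => none

def solve_alt (R : Int) (C : Int) (M : List (List String)) : String :=
  if gridNoHash M then joinGrid M
  else
    match scanFold R C (cellsList R C) (M, false) with
    | none => "Impossible"
    | some (G, found) => if found then joinGrid G else "Impossible"

-- ===== PRECONDITION & SPEC =====
-- Exactly the inputs on which the Python A returns (elsewhere its index M[r][c] raises
-- IndexError): either no row contains '#' (immediate return), or a loop range is empty,
-- or the R×C window lies inside the grid's shape.
def Pre_solve (R : Int) (C : Int) (M : List (List String)) : Prop :=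
  gridNoHash M = true ∨ R ≤ 0 ∨ C ≤ 0 ∨
    (R ≤ (M.length : Int) ∧ ∀ row ∈ M.take R.toNat, C ≤ (row.length : Int))
instance (R : Int) (C : Int) (M : List (List String)) : Decidable (Pre_solve R C M) := by
  unfold Pre_solve; infer_instance
def pvWitness_solve : Int × Int × List (List String) :=
  (2, 4, [["#", "#", ".", "#"], ["#", "#", ".", "#"]])
def Spec_solve (R : Int) (C : Int) (M : List (List String)) (out : String) : Prop := out = solve_alt R C M
instance (R : Int) (C : Int) (M : List (List String)) (out : String) : Decidable (Spec_solve R C M out) := by unfold Spec_solve; infer_instance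

-- ===== CLAIM (what is proved, stated in full; the proofs are below) =====
def Claim_equal_solve : Prop := ∀ (R : Int) (C : Int) (M : List (List String)), Dom_solve R C M → Pre_solve R C M → Spec_solve R C M (solve R C M)

-- ===== LEMMAS AND PROOFS =====

-- the forced greedy process both programs implement: repeatedly clear the first '#' of the window
def greedy (R C : Int) (M : List (List String)) : Option (List (List String)) :=
  match findHash R C M with
  | none => some M
  | some (r, c) => if blockOK R C M r c then greedy R C (place M r c) else none
termination_by countHash M
decreasing_by
  exact countHash_place_lt M r c (by
    rename_i hb; simp only [blockOK, Bool.and_eq_true, beq_iff_eq] at hb; tauto)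

-- row-major order on cells
def rmLE (p q : Nat × Nat) : Prop := p.1 < q.1 ∨ (p.1 = q.1 ∧ p.2 ≤ q.2)

-- the '#' cells of the R×C window, as a finite set
def winSet (R C : Int) (M : List (List String)) : Finset (Nat × Nat) :=
  (Finset.range R.toNat ×ˢ Finset.range C.toNat).filter (fun p => getCell M p.1 p.2 = "#")
-- the four cells of a 2x2 block with top-left (r, c)
def blockSet (r c : Nat) : Finset (Nat × Nat) := {(r, c), (r+1, c), (r, c+1), (r+1, c+1)}

-- a cell set is exactly tileable by in-window 2x2 blocks
inductive Tileable (R C : Int) : Finset (Nat × Nat) → Prop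
  | empty : Tileable R C ∅
  | cons (r c : Nat) (S : Finset (Nat × Nat)) : ((r:Int)+1 < R) → ((c:Int)+1 < C) →
      Disjoint (blockSet r c) S → Tileable R C S → Tileable R C (blockSet r c ∪ S)

theorem mem_winSet (R C : Int) (M : List (List String)) (p : Nat × Nat) :
    p ∈ winSet R C M ↔ p.1 < R.toNat ∧ p.2 < C.toNat ∧ getCell M p.1 p.2 = "#" := by
  simp [winSet, and_assoc]

-- decompose `range n = l₁ ++ a :: l₂`

theorem range_split (n : Nat) (l₁ l₂ : List Nat) (a : Nat)
    (h : List.range n = l₁ ++ a :: l₂) : a = l₁.length ∧ a < n ∧ l₁ = List.range a := by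
  have hlen : l₁.length < n := by
    have := congrArg List.length h
    simp at this; omega
  have ha : a = l₁.length := by
    have := congrArg (fun l => l[l₁.length]?) h
    simp [List.getElem?_range hlen] at this
    omega
  refine ⟨ha, by omega, ?_⟩
  have := congrArg (fun l => l.take l₁.length) h
  simp [List.take_range] at this
  rw [← this]; congr 1; omega

theorem mem_blockSet (r c : Nat) (p : Nat × Nat) :
    p ∈ blockSet r c ↔ p = (r, c) ∨ p = (r+1, c) ∨ p = (r, c+1) ∨ p = (r+1, c+1) := by
  simp [blockSet]

theorem blockOK_parts (R C : Int) (M : List (List String)) (r c : Nat)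
    (hb : blockOK R C M r c = true) :
    ((r:Int)+1 < R) ∧ ((c:Int)+1 < C) ∧ getCell M (r+1) c = "#"
      ∧ getCell M r (c+1) = "#" ∧ getCell M (r+1) (c+1) = "#" := by
  simp only [blockOK, Bool.and_eq_true, beq_iff_eq, decide_eq_true_eq] at hb
  tauto

theorem findHash_none_iff (R C : Int) (M : List (List String)) :
    findHash R C M = none ↔ winSet R C M = ∅ := by
  rw [Finset.eq_empty_iff_forall_notMem]
  constructor
  · intro h p hp
    rw [mem_winSet] at hp
    rw [findHash, List.findSome?_eq_none_iff] at h
    have h1 := h p.1 (by simp [hp.1])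
    rw [List.findSome?_eq_none_iff] at h1
    have := h1 p.2 (by simp [hp.2.1])
    simp [hp.2.2] at this
  · intro h
    rw [findHash, List.findSome?_eq_none_iff]
    intro r hr
    rw [List.findSome?_eq_none_iff]
    intro c hc
    simp only [List.mem_range] at hr hc
    have := h (r, c)
    rw [mem_winSet] at this
    simp only [beq_iff_eq]
    split
    · next hx => exact absurd ⟨hr, hc, hx⟩ this
    · rfl


theorem findHash_some (R C : Int) (M : List (List String)) (r c : Nat)
    (h : findHash R C M = some (r, c)) :
    (r, c) ∈ winSet R C M ∧ ∀ q ∈ winSet R C M, rmLE (r, c) q := by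
  rw [findHash, List.findSome?_eq_some_iff] at h
  obtain ⟨l₁, a, l₂, heq, ha, hnone⟩ := h
  obtain ⟨haL, haR, hl₁⟩ := range_split _ _ _ _ heq
  rw [List.findSome?_eq_some_iff] at ha
  obtain ⟨m₁, b, m₂, heq', hb, hnone'⟩ := ha
  obtain ⟨hbL, hbC, hm₁⟩ := range_split _ _ _ _ heq'
  have hra : a = r ∧ b = c ∧ getCell M r c = "#" := by
    by_cases hx : getCell M a b == "#"
    · simp [hx] at hb
      have h1 : a = r := hb.1
      have h2 : b = c := hb.2
      subst h1; subst h2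
      exact ⟨rfl, rfl, by simpa using hx⟩
    · simp [hx] at hb
  obtain ⟨h1, h2, h3⟩ := hra
  subst h1; subst h2
  refine ⟨(mem_winSet _ _ _ _).2 ⟨haR, hbC, h3⟩, ?_⟩
  intro q hq
  rw [mem_winSet] at hq
  obtain ⟨hq1, hq2, hq3⟩ := hq
  rcases Nat.lt_trichotomy q.1 a with hlt | heq1 | hgt
  · -- q in an earlier row: its row scan returned none, contradiction
    have := hnone q.1 (by rw [hl₁]; simpa using hlt)
    rw [List.findSome?_eq_none_iff] at this
    have := this q.2 (by simpa using hq2)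
    simp [hq3] at this
  · -- same row: earlier column impossible
    by_cases hcc : q.2 < b
    · have := hnone' q.2 (by rw [hm₁]; simpa using hcc)
      rw [← heq1] at this
      simp [hq3] at this
    · exact Or.inr ⟨heq1.symm, by omega⟩
  · exact Or.inl hgt


theorem findHash_eq_some_of (R C : Int) (M : List (List String)) (r c : Nat)
    (h1 : (r, c) ∈ winSet R C M) (h2 : ∀ q ∈ winSet R C M, rmLE (r, c) q) :
    findHash R C M = some (r, c) := by
  cases hf : findHash R C M with
  | none =>
    rw [findHash_none_iff] at hf
    rw [hf] at h1
    simp at h1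
  | some p =>
    obtain ⟨hp1, hp2⟩ := findHash_some R C M p.1 p.2 (by simpa using hf)
    have ha := h2 _ hp1
    have hb := hp2 _ h1
    simp only [rmLE] at ha hb
    have hpc : p.1 = r ∧ p.2 = c := by omega
    obtain ⟨px, py⟩ := p
    simp_all


theorem getCell_setCell_self (M : List (List String)) (r c : Nat) (v : String)
    (h : getCell M r c = "#") : getCell (setCell M r c v) r c = v := by
  induction M generalizing r with
  | nil => simp [getCell] at h
  | cons row rest ih =>
    cases r with
    | zero =>
      simp only [getCell, List.getElem?_cons_zero, Option.getD_some] at h ⊢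
      have hc : c < row.length := by
        by_contra hc
        rw [List.getElem?_eq_none (by omega)] at h
        simp at h
      simp [setCell, List.getElem?_set_self hc]
    | succ n =>
      simp only [getCell, List.getElem?_cons_succ] at h ⊢
      exact ih n h
theorem getCell_place_notMem (M : List (List String)) (r c : Nat) (p : Nat × Nat)
    (h : p ∉ blockSet r c) : getCell (place M r c) p.1 p.2 = getCell M p.1 p.2 := by
  rw [mem_blockSet] at h
  push Not at h
  obtain ⟨h1, h2, h3, h4⟩ := h
  rw [place,
    getCell_setCell_ne _ _ _ _ _ _ h4,
    getCell_setCell_ne _ _ _ _ _ _ h3,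
    getCell_setCell_ne _ _ _ _ _ _ h2,
    getCell_setCell_ne _ _ _ _ _ _ h1]


theorem getCell_place_mem (R C : Int) (M : List (List String)) (r c : Nat)
    (hrc : getCell M r c = "#") (hb : blockOK R C M r c = true) (p : Nat × Nat)
    (h : p ∈ blockSet r c) : getCell (place M r c) p.1 p.2 ≠ "#" := by
  obtain ⟨-, -, hb1, hb2, hb3⟩ := blockOK_parts R C M r c hb
  rw [mem_blockSet] at h
  rcases h with h | h | h | h <;> subst h <;> simp only [place]
  · rw [getCell_setCell_ne _ _ _ _ _ _ (by simp),
      getCell_setCell_ne _ _ _ _ _ _ (by simp),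
      getCell_setCell_ne _ _ _ _ _ _ (by simp),
      getCell_setCell_self _ _ _ _ hrc]
    decide
  · rw [getCell_setCell_ne _ _ _ _ _ _ (by simp),
      getCell_setCell_ne _ _ _ _ _ _ (by simp),
      getCell_setCell_self _ _ _ _
        (by rw [getCell_setCell_ne _ _ _ _ _ _ (by simp)]; exact hb1)]
    decide
  · rw [getCell_setCell_ne _ _ _ _ _ _ (by simp),
      getCell_setCell_self _ _ _ _
        (by rw [getCell_setCell_ne _ _ _ _ _ _ (by simp),
            getCell_setCell_ne _ _ _ _ _ _ (by simp)]; exact hb2)]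
    decide
  · rw [getCell_setCell_self _ _ _ _
        (by rw [getCell_setCell_ne _ _ _ _ _ _ (by simp),
            getCell_setCell_ne _ _ _ _ _ _ (by simp),
            getCell_setCell_ne _ _ _ _ _ _ (by simp)]; exact hb3)]
    decide


theorem winSet_place (R C : Int) (M : List (List String)) (r c : Nat)
    (hrc : getCell M r c = "#") (hb : blockOK R C M r c = true) :
    winSet R C (place M r c) = winSet R C M \ blockSet r c := by
  ext p
  rw [Finset.mem_sdiff, mem_winSet, mem_winSet]
  by_cases h : p ∈ blockSet r c
  · simp [getCell_place_mem R C M r c hrc hb p h, h]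
  · simp [getCell_place_notMem M r c p h, h]


theorem blockSet_subset_winSet (R C : Int) (M : List (List String)) (r c : Nat)
    (hmem : (r, c) ∈ winSet R C M) (hb : blockOK R C M r c = true) :
    blockSet r c ⊆ winSet R C M := by
  obtain ⟨hR, hC, hb1, hb2, hb3⟩ := blockOK_parts R C M r c hb
  rw [mem_winSet] at hmem
  intro p hp
  rw [mem_blockSet] at hp
  rw [mem_winSet]
  rcases hp with h | h | h | h <;> subst h <;> simp only
  · exact hmem
  · exact ⟨by omega, by omega, hb1⟩
  · exact ⟨by omega, by omega, hb2⟩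
  · exact ⟨by omega, by omega, hb3⟩


-- the forcing lemma: in a tileable set, the row-major least cell is the top-left of one of the blocks
theorem tileable_min (R C : Int) (S : Finset (Nat × Nat)) (ht : Tileable R C S) (r c : Nat)
    (hmem : (r, c) ∈ S) (hmin : ∀ q ∈ S, rmLE (r, c) q) :
    ((r:Int)+1 < R) ∧ ((c:Int)+1 < C) ∧ blockSet r c ⊆ S ∧ Tileable R C (S \ blockSet r c) := by
  induction ht with
  | empty => simp at hmem
  | cons a b S' hR hC hdis ht' ih =>
    by_cases hcase : (r, c) ∈ blockSet a b
    · have hab : (r, c) = (a, b) := by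
        have hmab := hmin (a, b) (Finset.mem_union_left _ (by rw [mem_blockSet]; tauto))
        rw [mem_blockSet] at hcase
        simp only [rmLE] at hmab
        simp only [Prod.mk.injEq] at hcase ⊢
        omega
      rw [Prod.ext_iff] at hab
      obtain ⟨h1, h2⟩ := hab
      subst h1; subst h2
      have hS' : (blockSet r c ∪ S') \ blockSet r c = S' := by
        ext p
        simp only [Finset.mem_sdiff, Finset.mem_union]
        have hpd : p ∈ blockSet r c → p ∉ S' := fun hp => Finset.disjoint_left.1 hdis hp
        tauto
      exact ⟨hR, hC, Finset.subset_union_left, by rw [hS']; exact ht'⟩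
    · have hmem' : (r, c) ∈ S' := by
        rcases Finset.mem_union.1 hmem with h | h
        · exact absurd h hcase
        · exact h
      obtain ⟨hR', hC', hsub', ht''⟩ := ih hmem'
        (fun q hq => hmin q (Finset.mem_union_right _ hq))
      have hdisrc : Disjoint (blockSet a b) (blockSet r c) :=
        Disjoint.mono_right hsub' hdis
      have hsplit : (blockSet a b ∪ S') \ blockSet r c
          = blockSet a b ∪ (S' \ blockSet r c) := by
        ext p
        simp only [Finset.mem_sdiff, Finset.mem_union]
        have hpd : p ∈ blockSet a b → p ∉ blockSet r c :=
          fun hp => Finset.disjoint_left.1 hdisrc hp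
        tauto
      refine ⟨hR', hC', hsub'.trans (Finset.subset_union_right), ?_⟩
      rw [hsplit]
      exact Tileable.cons a b _ hR hC (Disjoint.mono_right Finset.sdiff_subset hdis) ht''



theorem gridNoHash_eq_false (M : List (List String)) (r c : Nat)
    (h : getCell M r c = "#") : gridNoHash M = false := by
  rw [getCell] at h
  cases hx : M[r]? with
  | none => simp [hx] at h
  | some row =>
    rw [hx] at h
    simp only [Option.getD_some] at h
    cases hy : row[c]? with
    | none => simp [hy] at h
    | some s =>
      rw [hy] at h
      simp only [Option.getD_some] at h
      subst h
      have hrow : ("#" : String) ∈ row := List.mem_of_getElem? hy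
      have hmem : row ∈ M := List.mem_of_getElem? hx
      simp only [gridNoHash, Bool.not_eq_eq_eq_not, Bool.not_false, List.any_eq_true]
      exact ⟨row, hmem, by simpa [rowHasHash] using hrow⟩

theorem greedy_isSome_of_tileable (R C : Int) (M : List (List String))
    (ht : Tileable R C (winSet R C M)) : (greedy R C M).isSome := by
  suffices H : ∀ n M, countHash M = n → Tileable R C (winSet R C M) → (greedy R C M).isSome from
    H _ M rfl ht
  intro n
  induction n using Nat.strong_induction_on with
  | _ n ih =>
    intro M hn ht
    rw [greedy]
    cases hf : findHash R C M with
    | none => simp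
    | some p =>
      obtain ⟨r, c⟩ := p
      obtain ⟨hmem, hmin⟩ := findHash_some R C M r c hf
      obtain ⟨hR, hC, hsub, ht'⟩ := tileable_min R C _ ht r c hmem hmin
      have hrc : getCell M r c = "#" := ((mem_winSet _ _ _ _).1 hmem).2.2
      have g1 : getCell M (r+1) c = "#" :=
        ((mem_winSet _ _ _ _).1 (hsub ((mem_blockSet r c (r+1, c)).2 (by tauto)))).2.2
      have g2 : getCell M r (c+1) = "#" :=
        ((mem_winSet _ _ _ _).1 (hsub ((mem_blockSet r c (r, c+1)).2 (by tauto)))).2.2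
      have g3 : getCell M (r+1) (c+1) = "#" :=
        ((mem_winSet _ _ _ _).1 (hsub ((mem_blockSet r c (r+1, c+1)).2 (by tauto)))).2.2
      have hb : blockOK R C M r c = true := by
        simp only [blockOK, Bool.and_eq_true, beq_iff_eq, decide_eq_true_eq]
        exact ⟨⟨⟨⟨hR, hC⟩, g1⟩, g2⟩, g3⟩
      simp only [hb, if_true]
      exact ih _ (hn ▸ countHash_place_lt M r c g1) _ rfl
        (by rw [winSet_place R C M r c hrc hb]; exact ht')

theorem tileable_of_greedy_isSome (R C : Int) (M : List (List String))
    (hs : (greedy R C M).isSome) : Tileable R C (winSet R C M) := by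
  suffices H : ∀ n M, countHash M = n → (greedy R C M).isSome → Tileable R C (winSet R C M) from
    H _ M rfl hs
  intro n
  induction n using Nat.strong_induction_on with
  | _ n ih =>
    intro M hn hs
    rw [greedy] at hs
    cases hf : findHash R C M with
    | none =>
      rw [findHash_none_iff] at hf
      rw [hf]
      exact Tileable.empty
    | some p =>
      obtain ⟨r, c⟩ := p
      rw [hf] at hs
      simp only at hs
      cases hb : blockOK R C M r c with
      | false => rw [hb] at hs; simp at hs
      | true =>
        rw [hb] at hs
        simp only [if_true] at hs
        obtain ⟨hmem, hmin⟩ := findHash_some R C M r c hf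
        have hrc : getCell M r c = "#" := ((mem_winSet _ _ _ _).1 hmem).2.2
        obtain ⟨hR, hC, g1, g2, g3⟩ := blockOK_parts R C M r c hb
        have ht' : Tileable R C (winSet R C M \ blockSet r c) := by
          rw [← winSet_place R C M r c hrc hb]
          exact ih _ (hn ▸ countHash_place_lt M r c g1) _ rfl hs
        have hsub := blockSet_subset_winSet R C M r c hmem hb
        rw [← Finset.union_sdiff_of_subset hsub]
        exact Tileable.cons r c _ hR hC Finset.disjoint_sdiff ht'

theorem search_unfold_greedy (R C : Int) (M : List (List String)) (r c : Nat)
    (hh : getCell M r c = "#") :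
    search M R C r c = if blockOK R C M r c then greedy R C (place M r c) else none := by
  suffices H : ∀ n M (r c : Nat), countHash M = n → getCell M r c = "#" →
      search M R C r c = if blockOK R C M r c then greedy R C (place M r c) else none from
    H _ M r c rfl hh
  intro n
  induction n using Nat.strong_induction_on with
  | _ n ih =>
    intro M r c hn hh
    rw [search]
    rw [gridNoHash_eq_false M r c hh]
    simp only [Bool.false_eq_true, if_false]
    cases hb : blockOK R C M r c with
    | false => simp
    | true =>
      simp only [if_true]
      obtain ⟨hR, hC, g1, g2, g3⟩ := blockOK_parts R C M r c hb
      rw [greedy]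
      cases hf : findHash R C (place M r c) with
      | none => simp
      | some p =>
        obtain ⟨rr, cc⟩ := p
        simp only
        have hmem := (findHash_some R C _ rr cc hf).1
        have hrr : getCell (place M r c) rr cc = "#" := ((mem_winSet _ _ _ _).1 hmem).2.2
        exact ih _ (hn ▸ countHash_place_lt M r c g1) _ rr cc rfl hrr

theorem search_eq_greedy (M : List (List String)) (R C : Int) (r c : Nat)
    (h : findHash R C M = some (r, c)) : search M R C r c = greedy R C M := by
  have hrc : getCell M r c = "#" := ((mem_winSet _ _ _ _).1 (findHash_some R C M r c h).1).2.2
  have hg : greedy R C M = if blockOK R C M r c then greedy R C (place M r c) else none := by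
    conv_lhs => rw [greedy]
    rw [h]
  rw [search_unfold_greedy R C M r c hrc, hg]

theorem search_none_of_greedy_none (R C : Int) (M : List (List String)) (r c : Nat)
    (hr : r < R.toNat) (hc : c < C.toNat) (hrc : getCell M r c = "#")
    (hg : greedy R C M = none) : search M R C r c = none := by
  rw [search_unfold_greedy R C M r c hrc]
  cases hb : blockOK R C M r c with
  | false => simp
  | true =>
    simp only [if_true]
    cases hgp : greedy R C (place M r c) with
    | none => rfl
    | some G =>
      exfalso
      have hmem : (r, c) ∈ winSet R C M := (mem_winSet _ _ _ _).2 ⟨hr, hc, hrc⟩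
      obtain ⟨hR, hC, g1, g2, g3⟩ := blockOK_parts R C M r c hb
      have ht' : Tileable R C (winSet R C M \ blockSet r c) := by
        rw [← winSet_place R C M r c hrc hb]
        exact tileable_of_greedy_isSome R C _ (by rw [hgp]; rfl)
      have hsub := blockSet_subset_winSet R C M r c hmem hb
      have ht : Tileable R C (winSet R C M) := by
        rw [← Finset.union_sdiff_of_subset hsub]
        exact Tileable.cons r c _ hR hC Finset.disjoint_sdiff ht'
      have := greedy_isSome_of_tileable R C M ht
      rw [hg] at this
      simp at this

theorem findSome?_range_eq_some {α : Type} (f : Nat → Option α) (n k : Nat) (a : α)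
    (hk : k < n) (ha : f k = some a) (hnone : ∀ i < k, f i = none) :
    (List.range n).findSome? f = some a := by
  have hsplit : List.range n = List.range k ++ (List.range (n - k)).map (k + ·) := by
    rw [← List.range_add]; congr 1; omega
  rw [hsplit, List.findSome?_append,
    List.findSome?_eq_none_iff.mpr (fun x hx => hnone x (by simpa using hx))]
  obtain ⟨m, hm⟩ : ∃ m, n - k = m + 1 := ⟨n - k - 1, by omega⟩
  rw [hm, List.range_succ_eq_map]
  simp [ha]

-- the common normal form
def canon (R C : Int) (M : List (List String)) : String :=
  if gridNoHash M then joinGrid M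
  else
    match findHash R C M with
    | none => "Impossible"
    | some _ =>
      match greedy R C M with
      | some G => joinGrid G
      | none => "Impossible"

theorem solve_eq_canon (R C : Int) (M : List (List String)) : solve R C M = canon R C M := by
  unfold solve canon
  cases hg : gridNoHash M with
  | true => simp
  | false =>
    simp only [Bool.false_eq_true, if_false]
    cases hf : findHash R C M with
    | none =>
      rw [findHash_none_iff] at hf
      have houter : (List.range R.toNat).findSome? (fun r =>
          (List.range C.toNat).findSome? (fun c =>
            if getCell M r c == "#" then (search M R C r c).map joinGrid else none)) = none := by
        rw [List.findSome?_eq_none_iff]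
        intro r hr
        rw [List.findSome?_eq_none_iff]
        intro c hc
        simp only [List.mem_range] at hr hc
        have hne : getCell M r c ≠ "#" := by
          intro hx
          have : (r, c) ∈ winSet R C M := (mem_winSet _ _ _ _).2 ⟨hr, hc, hx⟩
          rw [hf] at this
          simp at this
        have : (getCell M r c == "#") = false := by simpa using hne
        simp [this]
      rw [houter]
    | some p =>
      obtain ⟨r, c⟩ := p
      obtain ⟨hmem, hmin⟩ := findHash_some R C M r c hf
      obtain ⟨hr, hc, hrc⟩ := (mem_winSet _ _ _ _).1 hmem
      have hearly : ∀ r' c', r' < R.toNat → c' < C.toNat →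
          (r' < r ∨ (r' = r ∧ c' < c)) → (getCell M r' c' == "#") = false := by
        intro r' c' hr' hc' hord
        have : getCell M r' c' ≠ "#" := by
          intro hx
          have := hmin (r', c') ((mem_winSet _ _ _ _).2 ⟨hr', hc', hx⟩)
          simp only [rmLE] at this
          omega
        simpa using this
      cases hgr : greedy R C M with
      | some G =>
        have houter : (List.range R.toNat).findSome? (fun r =>
            (List.range C.toNat).findSome? (fun c =>
              if getCell M r c == "#" then (search M R C r c).map joinGrid else none))
            = some (joinGrid G) := by
          apply findSome?_range_eq_some _ _ r _ hr
          · apply findSome?_range_eq_some _ _ c _ hc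
            · have hbeq : (getCell M r c == "#") = true := by simpa using hrc
              rw [hbeq]
              simp only [if_true]
              rw [search_eq_greedy M R C r c hf, hgr]
              rfl
            · intro i hi
              rw [hearly r i hr (lt_trans hi hc) (Or.inr ⟨rfl, hi⟩)]
              simp
          · intro i hi
            rw [List.findSome?_eq_none_iff]
            intro c' hc'
            simp only [List.mem_range] at hc'
            rw [hearly i c' (hr.trans' hi) hc' (Or.inl hi)]
            simp
        rw [houter]
      | none =>
        have houter : (List.range R.toNat).findSome? (fun r =>
            (List.range C.toNat).findSome? (fun c =>
              if getCell M r c == "#" then (search M R C r c).map joinGrid else none)) = none := by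
          rw [List.findSome?_eq_none_iff]
          intro r' hr'
          rw [List.findSome?_eq_none_iff]
          intro c' hc'
          simp only [List.mem_range] at hr' hc'
          by_cases hx : getCell M r' c' = "#"
          · have hs := search_none_of_greedy_none R C M r' c' hr' hc' hx hgr
            have hbeq : (getCell M r' c' == "#") = true := by simpa using hx
            simp [hbeq, hs]
          · have hbeq : (getCell M r' c' == "#") = false := by simpa using hx
            simp [hbeq]
        rw [houter]

theorem mem_cellsList (R C : Int) (p : Nat × Nat) :
    p ∈ cellsList R C ↔ p.1 < R.toNat ∧ p.2 < C.toNat := by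
  obtain ⟨a, b⟩ := p
  simp [cellsList]

theorem cellsList_pairwise (R C : Int) : (cellsList R C).Pairwise rmLE := by
  unfold cellsList
  generalize C.toNat = m
  induction R.toNat with
  | zero => simp
  | succ k ihn =>
    rw [List.range_succ, List.flatMap_append]
    apply List.pairwise_append.2
    refine ⟨ihn, ?_, ?_⟩
    · simp only [List.flatMap_cons, List.flatMap_nil, List.append_nil]
      rw [List.pairwise_map]
      exact (List.pairwise_lt_range).imp (fun h => Or.inr ⟨rfl, le_of_lt h⟩)
    · intro x hx y hy
      simp only [List.mem_flatMap, List.mem_map, List.mem_range] at hx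
      simp only [List.flatMap_cons, List.flatMap_nil, List.append_nil, List.mem_map] at hy
      obtain ⟨r, hrk, c, -, hxe⟩ := hx
      obtain ⟨c', -, hye⟩ := hy
      subst hxe
      subst hye
      exact Or.inl hrk

theorem scanFold_eq (R C : Int) (L : List (Nat × Nat)) (G : List (List String)) (found : Bool)
    (h1 : ∀ q ∈ L, q.1 < R.toNat ∧ q.2 < C.toNat) (h2 : L.Pairwise rmLE)
    (h3 : ∀ q ∈ winSet R C G, q ∈ L) :
    scanFold R C L (G, found) =
      match greedy R C G with
      | none => none
      | some G' => some (G', found || (findHash R C G).isSome) := by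
  induction L generalizing G found with
  | nil =>
    have hw : winSet R C G = ∅ :=
      Finset.eq_empty_iff_forall_notMem.2 (fun p hp => by simpa using h3 p hp)
    have hf : findHash R C G = none := (findHash_none_iff R C G).2 hw
    have hgg : greedy R C G = some G := by
      conv_lhs => rw [greedy]
      rw [hf]
    rw [hgg]
    simp [scanFold, hf]
  | cons p ps ih =>
    obtain ⟨pr, pc⟩ := p
    have h1' : ∀ q ∈ ps, q.1 < R.toNat ∧ q.2 < C.toNat := fun q hq => h1 q (List.mem_cons_of_mem _ hq)
    have h2' : ps.Pairwise rmLE := (List.pairwise_cons.1 h2).2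
    by_cases hx : getCell G pr pc = "#"
    · have hbnd := h1 (pr, pc) List.mem_cons_self
      have hmemw : (pr, pc) ∈ winSet R C G := (mem_winSet _ _ _ _).2 ⟨hbnd.1, hbnd.2, hx⟩
      have hmin : ∀ q ∈ winSet R C G, rmLE (pr, pc) q := by
        intro q hq
        rcases List.mem_cons.1 (h3 q hq) with heq | hmemps
        · subst heq; exact Or.inr ⟨rfl, le_rfl⟩
        · exact (List.pairwise_cons.1 h2).1 q hmemps
      have hf : findHash R C G = some (pr, pc) := findHash_eq_some_of R C G pr pc hmemw hmin
      have hgg : greedy R C G = if blockOK R C G pr pc then greedy R C (place G pr pc) else none := by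
        conv_lhs => rw [greedy]
        rw [hf]
      have hxb : (getCell G pr pc == "#") = true := by simpa using hx
      cases hb : blockOK R C G pr pc with
      | false =>
        rw [hb] at hgg
        simp only [Bool.false_eq_true, if_false] at hgg
        rw [hgg]
        simp [scanFold, scanStep, hxb, hb]
      | true =>
        rw [hb] at hgg
        simp only [if_true] at hgg
        have h3' : ∀ q ∈ winSet R C (place G pr pc), q ∈ ps := by
          intro q hq
          rw [winSet_place R C G pr pc hx hb, Finset.mem_sdiff] at hq
          rcases List.mem_cons.1 (h3 q hq.1) with heq | hmemps
          · subst heq; exact absurd ((mem_blockSet pr pc (pr, pc)).2 (Or.inl rfl)) hq.2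
          · exact hmemps
        have hlhs : scanFold R C ((pr, pc) :: ps) (G, found) =
            scanFold R C ps (place G pr pc, true) := by
          simp [scanFold, scanStep, hxb, hb]
        rw [hlhs, ih _ _ h1' h2' h3', hgg, hf]
        cases hgp : greedy R C (place G pr pc) <;> simp
    · have hxb : (getCell G pr pc == "#") = false := by simpa using hx
      have h3' : ∀ q ∈ winSet R C G, q ∈ ps := by
        intro q hq
        rcases List.mem_cons.1 (h3 q hq) with heq | hmemps
        · subst heq; exact absurd ((mem_winSet _ _ _ _).1 hq).2.2 hx
        · exact hmemps
      have hlhs : scanFold R C ((pr, pc) :: ps) (G, found) = scanFold R C ps (G, found) := by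
        simp [scanFold, scanStep, hxb]
      rw [hlhs, ih _ _ h1' h2' h3']

theorem solve_alt_eq_canon (R C : Int) (M : List (List String)) :
    solve_alt R C M = canon R C M := by
  unfold solve_alt canon
  cases hg : gridNoHash M with
  | true => simp
  | false =>
    simp only [Bool.false_eq_true, if_false]
    rw [scanFold_eq R C (cellsList R C) M false
      (fun q hq => (mem_cellsList R C q).1 hq) (cellsList_pairwise R C)
      (fun q hq => (mem_cellsList R C q).2
        ⟨((mem_winSet _ _ _ _).1 hq).1, ((mem_winSet _ _ _ _).1 hq).2.1⟩)]
    cases hgr : greedy R C M with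
    | none =>
      cases hf : findHash R C M with
      | none =>
        exfalso
        have : greedy R C M = some M := by
          conv_lhs => rw [greedy]
          rw [hf]
        rw [hgr] at this
        simp at this
      | some p => simp
    | some G =>
      cases hf : findHash R C M with
      | none => simp
      | some p => simp

-- ===== VERDICT (by name: the statement is the Claim_ definition above) =====
theorem solve_spec : Claim_equal_solve := by
  intro R C M _ _
  unfold Spec_solve
  rw [solve_eq_canon, solve_alt_eq_canon]
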